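-- pv_equiv track=rewrite | github.com/ecapital1/puppetcode | test/iToolBox2/src/lib/tradereport.py | generatePLPerCurrencyCSV
-- ===== SOURCE A (Python) =====
-- def generatePLPerCurrencyCSV(summaryBook, PnL=True):
--     report = [];
--
--     if(PnL is True):
--         report.append('PnL PER CURRENCY');
--     else:
--         report.append('FEE PER CURRENCY');
--
--     first_line = 'CURRENCY,';
--     for curr in summaryBook:
--         first_line += '%s'%curr;
--         for i in range(len(summaryBook[curr].keys())):
--             first_line += ',';
--     report.append(first_line);
--
--     acc_line = 'ACCOUNT,';
--     for curr in summaryBook: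
--         for account in summaryBook[curr]:
--             acc_line += '%s,'%account
--     report.append(acc_line);
--
--     pl_line = "TOTAL,";
--     for curr in summaryBook:
--         for account in summaryBook[curr]:
--             pl_line += '%s,'%summaryBook[curr][account];
--     report.append(pl_line);
--
--     sum_line = 'SUM,';
--     for curr in summaryBook:
--         total = 0;
--         for acc in summaryBook[curr]:
--             total += summaryBook[curr][acc];
--         sum_line += '%s %s'%(curr,total);
--         for i in range(len(summaryBook[curr].keys())):
--             sum_line += ',';
--     report.append(sum_line);
--     return report;
-- ===== SOURCE B (Python) =====
-- def generatePLPerCurrencyCSV(summaryBook, PnL=True):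
--     head = 'CURRENCY,'
--     accs = 'ACCOUNT,'
--     vals = 'TOTAL,'
--     sums = 'SUM,'
--     for curr, accounts in summaryBook.items():
--         total = 0
--         n = 0
--         for account, value in accounts.items():
--             accs += '%s,' % account
--             vals += '%s,' % value
--             total += value
--             n += 1
--         head += curr + ',' * n
--         sums += '%s %s' % (curr, total) + ',' * n
--     title = 'PnL PER CURRENCY' if PnL is True else 'FEE PER CURRENCY'
--     return [title, head, accs, vals, sums]
-- ===== Notes on version B (the rewrite author's own statement) =====
-- stated objective: simpler
-- what changed: Builds all four CSV lines in a single pass over the book (with one inner pass per currency accumulating the account/PnL strings, the integer total and the account count), instead of A's four separate full traversals each re-looking the dict up by key.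
import Mathlib
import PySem

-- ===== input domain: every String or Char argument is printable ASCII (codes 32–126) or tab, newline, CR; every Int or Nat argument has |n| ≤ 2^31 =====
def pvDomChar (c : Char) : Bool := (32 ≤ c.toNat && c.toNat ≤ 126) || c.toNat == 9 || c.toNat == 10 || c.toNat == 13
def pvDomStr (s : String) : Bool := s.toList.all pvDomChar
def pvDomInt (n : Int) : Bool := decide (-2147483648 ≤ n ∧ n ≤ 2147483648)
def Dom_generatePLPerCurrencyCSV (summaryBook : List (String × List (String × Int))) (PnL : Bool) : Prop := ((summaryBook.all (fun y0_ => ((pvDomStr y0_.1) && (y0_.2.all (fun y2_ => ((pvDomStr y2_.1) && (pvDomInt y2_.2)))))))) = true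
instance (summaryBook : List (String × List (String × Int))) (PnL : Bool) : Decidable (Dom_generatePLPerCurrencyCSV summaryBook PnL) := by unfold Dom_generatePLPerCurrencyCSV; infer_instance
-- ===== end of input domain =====

-- B builds all four CSV lines in one pass over the book (simpler decomposition); A makes four separate passes with dict lookups.
-- Pre_ excludes association lists with duplicate currency or account keys, which cannot arise from a Python dict.


-- ===== PORT A =====
-- dict lookup `d[k]` with a default (the default is unreachable in A: every looked-up key comes from iterating the same dict)
def pvLookupD {α : Type} (l : List (String × α)) (k : String) (dflt : α) : α :=
  match l with
  | [] => dflt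
  | (k', v) :: rest => if k' == k then v else pvLookupD rest k dflt

def generatePLPerCurrencyCSV (summaryBook : List (String × List (String × Int))) (PnL : Bool) : List String :=
  let report : List String := if PnL = true then ["PnL PER CURRENCY"] else ["FEE PER CURRENCY"]
  let first_line := summaryBook.foldl (fun s p =>
      (List.range (pvLookupD summaryBook p.1 []).length).foldl (fun s _ => s ++ ",") (s ++ p.1))
      "CURRENCY,"
  let acc_line := summaryBook.foldl (fun s p =>
      (pvLookupD summaryBook p.1 []).foldl (fun s a => s ++ a.1 ++ ",") s)
      "ACCOUNT,"
  let pl_line := summaryBook.foldl (fun s p =>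
      (pvLookupD summaryBook p.1 []).foldl
        (fun s a => s ++ PySem.Int.toStr (pvLookupD (pvLookupD summaryBook p.1 []) a.1 0) ++ ",") s)
      "TOTAL,"
  let sum_line := summaryBook.foldl (fun s p =>
      let total := (pvLookupD summaryBook p.1 []).foldl
        (fun t a => t + pvLookupD (pvLookupD summaryBook p.1 []) a.1 0) (0 : Int)
      (List.range (pvLookupD summaryBook p.1 []).length).foldl (fun s _ => s ++ ",")
        (s ++ p.1 ++ " " ++ PySem.Int.toStr total))
      "SUM,"
  report ++ [first_line, acc_line, pl_line, sum_line]

-- ===== PORT B =====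
def generatePLPerCurrencyCSV_alt (summaryBook : List (String × List (String × Int))) (PnL : Bool) : List String :=
  let st := summaryBook.foldl
    (fun (st : String × String × String × String) p =>
      let inner := p.2.foldl
        (fun (q : String × String × Int × Nat) a =>
          (q.1 ++ a.1 ++ ",", q.2.1 ++ PySem.Int.toStr a.2 ++ ",", q.2.2.1 + a.2, q.2.2.2 + 1))
        (st.2.1, st.2.2.1, 0, 0)
      (st.1 ++ p.1 ++ String.ofList (List.replicate inner.2.2.2 ','),
       inner.1, inner.2.1,
       st.2.2.2 ++ p.1 ++ " " ++ PySem.Int.toStr inner.2.2.1 ++ String.ofList (List.replicate inner.2.2.2 ',')))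
    ("CURRENCY,", "ACCOUNT,", "TOTAL,", "SUM,")
  let title : String := if PnL then "PnL PER CURRENCY" else "FEE PER CURRENCY"
  [title, st.1, st.2.1, st.2.2.1, st.2.2.2]

-- ===== PRECONDITION & SPEC =====
-- Pre_ excludes association lists with duplicate currency keys or duplicate account keys within a
-- currency: a Python dict cannot contain them, so A never sees such inputs; with duplicates the
-- list representation's lookup-vs-iteration behaviour would be a pure artefact of the encoding.
def Pre_generatePLPerCurrencyCSV (summaryBook : List (String × List (String × Int))) (PnL : Bool) : Prop :=
  (summaryBook.map (·.1)).Nodup ∧ ∀ p ∈ summaryBook, (p.2.map (·.1)).Nodup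
instance (summaryBook : List (String × List (String × Int))) (PnL : Bool) : Decidable (Pre_generatePLPerCurrencyCSV summaryBook PnL) := by unfold Pre_generatePLPerCurrencyCSV; infer_instance
def pvWitness_generatePLPerCurrencyCSV : (List (String × List (String × Int))) × Bool :=
  ([("USD", [("a", 3), ("b", -2)]), ("EUR", [("x", 0)])], true)

def Spec_generatePLPerCurrencyCSV (summaryBook : List (String × List (String × Int))) (PnL : Bool) (out : List String) : Prop := out = generatePLPerCurrencyCSV_alt summaryBook PnL
instance (summaryBook : List (String × List (String × Int))) (PnL : Bool) (out : List String) : Decidable (Spec_generatePLPerCurrencyCSV summaryBook PnL out) := by unfold Spec_generatePLPerCurrencyCSV; infer_instance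

-- ===== CLAIM (what is proved, stated in full; the proofs are below) =====
def Claim_equal_generatePLPerCurrencyCSV : Prop := ∀ (summaryBook : List (String × List (String × Int))) (PnL : Bool), Dom_generatePLPerCurrencyCSV summaryBook PnL → Pre_generatePLPerCurrencyCSV summaryBook PnL → Spec_generatePLPerCurrencyCSV summaryBook PnL (generatePLPerCurrencyCSV summaryBook PnL)

-- ===== LEMMAS AND PROOFS =====

theorem pvLookupD_of_nodup {α : Type} (l : List (String × α)) (d : α)
    (h : (l.map (·.1)).Nodup) (p : String × α) (hp : p ∈ l) : pvLookupD l p.1 d = p.2 := by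
  induction l with
  | nil => cases hp
  | cons q rest ih =>
    simp only [List.map_cons, List.nodup_cons] at h
    rcases List.mem_cons.mp hp with rfl | hmem
    · simp [pvLookupD]
    · have hne : q.1 ≠ p.1 := fun he => h.1 (he ▸ List.mem_map_of_mem hmem)
      simp only [pvLookupD, beq_iff_eq, if_neg hne]
      exact ih h.2 hmem

theorem comma_foldl (n : Nat) (s : String) :
    (List.range n).foldl (fun s _ => s ++ ",") s = s ++ String.ofList (List.replicate n ',') := by
  induction n generalizing s with
  | zero => apply String.ext; simp [String.toList_ofList]
  | succ k ih =>
    rw [List.range_succ, List.foldl_append]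
    simp only [List.foldl_cons, List.foldl_nil, ih]
    apply String.ext
    simp [String.toList_ofList, List.replicate_succ' (n := k)]

theorem inner_foldl (l : List (String × Int)) (a v : String) (t : Int) (n : Nat) :
    l.foldl (fun (q : String × String × Int × Nat) x =>
        (q.1 ++ x.1 ++ ",", q.2.1 ++ PySem.Int.toStr x.2 ++ ",", q.2.2.1 + x.2, q.2.2.2 + 1))
      (a, v, t, n)
    = (l.foldl (fun s x => s ++ x.1 ++ ",") a,
       l.foldl (fun s x => s ++ PySem.Int.toStr x.2 ++ ",") v,
       l.foldl (fun s x => s + x.2) t,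
       n + l.length) := by
  induction l generalizing a v t n with
  | nil => simp
  | cons x rest ih => simp [List.foldl_cons, ih]; omega

theorem outer_foldl (l : List (String × List (String × Int))) (h a v s : String) :
    l.foldl
      (fun (st : String × String × String × String) p =>
        let inner := p.2.foldl
          (fun (q : String × String × Int × Nat) x =>
            (q.1 ++ x.1 ++ ",", q.2.1 ++ PySem.Int.toStr x.2 ++ ",", q.2.2.1 + x.2, q.2.2.2 + 1))
          (st.2.1, st.2.2.1, 0, 0)
        (st.1 ++ p.1 ++ String.ofList (List.replicate inner.2.2.2 ','),
         inner.1, inner.2.1,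
         st.2.2.2 ++ p.1 ++ " " ++ PySem.Int.toStr inner.2.2.1 ++ String.ofList (List.replicate inner.2.2.2 ',')))
      (h, a, v, s)
    = (l.foldl (fun s p => s ++ p.1 ++ String.ofList (List.replicate p.2.length ',')) h,
       l.foldl (fun s p => p.2.foldl (fun s x => s ++ x.1 ++ ",") s) a,
       l.foldl (fun s p => p.2.foldl (fun s x => s ++ PySem.Int.toStr x.2 ++ ",") s) v,
       l.foldl (fun s p => s ++ p.1 ++ " " ++ PySem.Int.toStr (p.2.foldl (fun t x => t + x.2) 0)
                 ++ String.ofList (List.replicate p.2.length ',')) s) := by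
  induction l generalizing h a v s with
  | nil => simp
  | cons p rest ih =>
    rw [List.foldl_cons, ih]
    simp [inner_foldl, List.foldl_cons]

-- ===== VERDICT (by name: the statement is the Claim_ definition above) =====
theorem generatePLPerCurrencyCSV_spec : Claim_equal_generatePLPerCurrencyCSV := by
  intro sb PnL _ hpre
  unfold Spec_generatePLPerCurrencyCSV generatePLPerCurrencyCSV generatePLPerCurrencyCSV_alt
  obtain ⟨h1, h2⟩ := hpre
  rw [outer_foldl]
  have hlk : ∀ (p : String × List (String × Int)), p ∈ sb → pvLookupD sb p.1 [] = p.2 :=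
    fun p hp => pvLookupD_of_nodup sb [] h1 p hp
  have hfirst : sb.foldl (fun s p =>
      (List.range (pvLookupD sb p.1 []).length).foldl (fun s _ => s ++ ",") (s ++ p.1)) "CURRENCY,"
      = sb.foldl (fun s p => s ++ p.1 ++ String.ofList (List.replicate p.2.length ',')) "CURRENCY," := by
    apply PySem.List.foldl_congr_mem
    intro acc p hp
    rw [hlk p hp, comma_foldl]
  have hacc : sb.foldl (fun s p => (pvLookupD sb p.1 []).foldl (fun s a => s ++ a.1 ++ ",") s) "ACCOUNT,"
      = sb.foldl (fun s p => p.2.foldl (fun s x => s ++ x.1 ++ ",") s) "ACCOUNT," := by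
    apply PySem.List.foldl_congr_mem
    intro acc p hp
    rw [hlk p hp]
  have hpl : sb.foldl (fun s p => (pvLookupD sb p.1 []).foldl
        (fun s a => s ++ PySem.Int.toStr (pvLookupD (pvLookupD sb p.1 []) a.1 0) ++ ",") s) "TOTAL,"
      = sb.foldl (fun s p => p.2.foldl (fun s x => s ++ PySem.Int.toStr x.2 ++ ",") s) "TOTAL," := by
    apply PySem.List.foldl_congr_mem
    intro acc p hp
    rw [hlk p hp]
    apply PySem.List.foldl_congr_mem
    intro acc2 x hx
    rw [pvLookupD_of_nodup p.2 0 (h2 p hp) x hx]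
  have hsum : sb.foldl (fun s p =>
      let total := (pvLookupD sb p.1 []).foldl
        (fun t a => t + pvLookupD (pvLookupD sb p.1 []) a.1 0) (0 : Int)
      (List.range (pvLookupD sb p.1 []).length).foldl (fun s _ => s ++ ",")
        (s ++ p.1 ++ " " ++ PySem.Int.toStr total)) "SUM,"
      = sb.foldl (fun s p => s ++ p.1 ++ " " ++ PySem.Int.toStr (p.2.foldl (fun t x => t + x.2) 0)
                 ++ String.ofList (List.replicate p.2.length ',')) "SUM," := by
    apply PySem.List.foldl_congr_mem
    intro acc p hp
    simp only [hlk p hp]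
    have htot : p.2.foldl (fun t a => t + pvLookupD p.2 a.1 0) (0 : Int)
        = p.2.foldl (fun t x => t + x.2) 0 := by
      apply PySem.List.foldl_congr_mem
      intro t x hx
      rw [pvLookupD_of_nodup p.2 0 (h2 p hp) x hx]
    rw [htot, comma_foldl]
  rw [hfirst, hacc, hpl, hsum]
  cases PnL <;> simp
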